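-- pv_equiv track=rewrite | github.com/981377660LMT/algorithm-study | 11_动态规划/dp优化/贪心+dp/1531. 压缩字符串 II-删除子序列-dp.py | getLengthOfOptimalCompression
-- ===== SOURCE A (Python) =====
-- from functools import lru_cache
--
-- INF = int(1e20)
--
-- def getLRELen(blockLen: int) -> int:
--     """blockLen表示新追加的block的(相同)数字的个数
--
--     注意只有1个时 编码长度为1
--     a => a
--     aa => a2
--     """
--     return blockLen if blockLen <= 1 else len(str(blockLen)) + 1
--
-- def getLengthOfOptimalCompression(s: str, k: int) -> int:
--     @lru_cache(None)
--     def dfs(index: int, count: int) -> int: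
--         if count > target:
--             return INF
--         if index == len(s):
--             return 0 if count == target else INF
--
--         res = INF
--         sameCount = 0
--         # 我们可以从当前的位置 index 开始向后遍历，只要发现后面有字符和 s[p] 相等，则选取。这样我们可以枚举选取的字符数量，进行状态转移。
--         for next in range(index, len(s)):
--             sameCount += int(s[next] == s[index])
--             res = min(res, dfs(next + 1, count + sameCount) + getLRELen(sameCount))
--
--         res = min(res, dfs(index + 1, count))
--         return res
--
--     target = len(s) - k
--     res = dfs(0, 0)
--     dfs.cache_clear()
--     return res
-- ===== SOURCE B (Python) =====
-- INF = int(1e20)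
--
--
-- def getLengthOfOptimalCompression(s: str, k: int) -> int:
--     """Bottom-up tabulation: rows of exact-keep DP built from the end of s.
--
--     rows_from(i)[d][need] = min compressed length of s[i+d:] keeping exactly
--     `need` of its characters (INF if impossible).
--     """
--     n = len(s)
--     target = n - k
--     if target < 0 or target > n:
--         return INF
--
--     def lre(c: int) -> int:
--         return c if c <= 1 else len(str(c)) + 1
--
--     def rows_from(i: int) -> list:
--         if i == n:
--             return [[0] + [INF] * n]
--         rows = rows_from(i + 1)
--         row = []
--         for need in range(n + 1):
--             best = rows[0][need]  # delete s[i]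
--             same = 0
--             for j in range(i, n):
--                 if s[j] == s[i]:
--                     same += 1
--                 if same <= need:
--                     cand = lre(same) + rows[j - i][need - same]
--                     if cand < best:
--                         best = cand
--             row.append(best)
--         return [row] + rows
--
--     return rows_from(0)[0][target]
-- ===== Notes on version B (the rewrite author's own statement) =====
-- stated objective: alternative
-- what changed: Top-down lru_cache recursion on (index, kept-count) replaced by an explicit bottom-up table built from the end of the string, indexed by how many characters must still be kept in the suffix; the delete branch seeds each cell and infeasible transitions are skipped instead of propagating INF.
import Mathlib
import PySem

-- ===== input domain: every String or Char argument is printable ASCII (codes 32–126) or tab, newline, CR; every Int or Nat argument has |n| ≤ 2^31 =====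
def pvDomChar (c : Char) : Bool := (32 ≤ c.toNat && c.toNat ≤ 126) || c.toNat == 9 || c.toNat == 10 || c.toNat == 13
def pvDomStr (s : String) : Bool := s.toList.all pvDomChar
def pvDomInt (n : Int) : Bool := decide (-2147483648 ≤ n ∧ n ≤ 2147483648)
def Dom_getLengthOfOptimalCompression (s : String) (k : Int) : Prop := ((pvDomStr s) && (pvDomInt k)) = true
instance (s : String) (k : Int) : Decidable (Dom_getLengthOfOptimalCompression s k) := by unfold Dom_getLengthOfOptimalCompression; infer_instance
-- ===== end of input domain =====

-- B replaces A's top-down memoized recursion on (index, kept-count) by a bottom-up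
-- table of rows indexed by the number of characters still to keep; alternative
-- decomposition, same asymptotic cost.


-- ===== PORT A =====
-- INF = int(1e20)
def pvINF : Int := 100000000000000000000

-- getLRELen(blockLen)
def getLRELen (blockLen : Int) : Int :=
  if blockLen ≤ 1 then blockLen else ((PySem.Int.toChars blockLen).length : Int) + 1

-- dfs(index, count), with gas = len(s) - index; the loop over `next` runs over
-- offsets t (next = index + t), so dfs(next+1, …) has gas g - t; sameCount is the
-- loop's nonnegative counter.
def dfsA (cs : List Char) (target : Int) (gas : Nat) (count : Int) : Int :=
  if count > target then pvINF
  else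
    match gas with
    | 0 => if count = target then 0 else pvINF
    | g + 1 =>
      let index := cs.length - (g + 1)
      let p := (List.range (g + 1)).foldl
        (fun (acc : Nat × Int) t =>
          let sameCount := acc.1 + (if cs.getD (index + t) ' ' = cs.getD index ' ' then 1 else 0)
          (sameCount, min acc.2 (dfsA cs target (g - t) (count + (sameCount : Int)) + getLRELen (sameCount : Int))))
        (0, pvINF)
      min p.2 (dfsA cs target g count)
termination_by gas
decreasing_by all_goals omega

def getLengthOfOptimalCompression (s : String) (k : Int) : Int :=
  let cs := s.toList
  let target : Int := (cs.length : Int) - k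
  dfsA cs target cs.length 0

-- ===== PORT B =====
-- lre(c) from Source B (c is a nonnegative count)
def lreB (c : Nat) : Int :=
  if c ≤ 1 then (c : Int) else ((PySem.Int.toChars (c : Int)).length : Int) + 1

-- rows_from(i) from Source B, with gas = n - i: the list of DP rows for positions
-- i..n; row[need] = min compressed length of s[pos:] keeping exactly `need` chars.
def buildRows (cs : List Char) : Nat → List (List Int)
  | 0 => [0 :: List.replicate cs.length pvINF]
  | g + 1 =>
    let rows := buildRows cs g
    let n := cs.length
    let i := n - (g + 1)
    let row := (List.range (n + 1)).map (fun need =>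
      let p := (List.range' i (n - i)).foldl
        (fun (acc : Nat × Int) j =>
          let same := acc.1 + (if cs.getD j ' ' = cs.getD i ' ' then 1 else 0)
          let best :=
            if same ≤ need then
              let cand := lreB same + ((rows.getD (j - i) []).getD (need - same) 0)
              if cand < acc.2 then cand else acc.2
            else acc.2
          (same, best))
        (0, (rows.getD 0 []).getD need 0)
      p.2)
    row :: rows

def getLengthOfOptimalCompression_alt (s : String) (k : Int) : Int :=
  let cs := s.toList
  let n := cs.length
  let target : Int := (n : Int) - k
  if target < 0 ∨ (n : Int) < target then pvINF
  else ((buildRows cs n).getD 0 []).getD target.toNat 0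

-- ===== PRECONDITION & SPEC =====
def Spec_getLengthOfOptimalCompression (s : String) (k : Int) (out : Int) : Prop := out = getLengthOfOptimalCompression_alt s k
instance (s : String) (k : Int) (out : Int) : Decidable (Spec_getLengthOfOptimalCompression s k out) := by unfold Spec_getLengthOfOptimalCompression; infer_instance

-- ===== CLAIM (what is proved, stated in full; the proofs are below) =====
def Claim_equal_getLengthOfOptimalCompression : Prop := ∀ (s : String) (k : Int), Dom_getLengthOfOptimalCompression s k → Spec_getLengthOfOptimalCompression s k (getLengthOfOptimalCompression s k)

-- ===== LEMMAS AND PROOFS =====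

-- the shape of A's inner loop: counter plus running min over all candidates
def stepOf (ind : Nat → Nat) (c : Nat → Nat → Int) : Nat × Int → Nat → Nat × Int :=
  fun acc t => (acc.1 + ind t, min acc.2 (c t (acc.1 + ind t)))

-- the shape of B's inner loop: counter plus running min over feasible candidates
def stepOfB (ind : Nat → Nat) (c : Nat → Nat → Int) (need : Nat) : Nat × Int → Nat → Nat × Int :=
  fun acc t => (acc.1 + ind t,
    if acc.1 + ind t ≤ need then
      (if c t (acc.1 + ind t) < acc.2 then c t (acc.1 + ind t) else acc.2)
    else acc.2)

lemma lreB_cast (s : Nat) : lreB s = getLRELen (s : Int) := by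
  simp [lreB, getLRELen]

lemma getLRELen_nonneg (c : Int) (hc : 0 ≤ c) : 0 ≤ getLRELen c := by
  unfold getLRELen
  split
  · exact hc
  · positivity

lemma if_lt_min (x m : Int) : (if x < m then x else m) = min m x := by
  rcases lt_or_ge x m with h | h
  · rw [if_pos h, min_eq_right h.le]
  · rw [if_neg (not_lt.mpr h), min_eq_left h]

lemma min_absorb (d rA x : Int) (h : d ≤ x) : min d rA = min d (min rA x) := by
  rw [min_comm rA x, ← min_assoc, min_eq_left h]

-- unfolding equations for the ports, in step shape
lemma dfsA_gt (cs : List Char) (target : Int) (gas : Nat) (count : Int)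
    (h : count > target) : dfsA cs target gas count = pvINF := by
  rw [dfsA.eq_def, if_pos h]

lemma dfsA_zero (cs : List Char) (target : Int) (count : Int) (h : ¬ count > target) :
    dfsA cs target 0 count = if count = target then 0 else pvINF := by
  rw [dfsA.eq_def, if_neg h]

lemma dfsA_succ (cs : List Char) (target : Int) (g : Nat) (count : Int)
    (h : ¬ count > target) :
    dfsA cs target (g + 1) count =
      min (((List.range (g + 1)).foldl
        (stepOf (fun t => if cs.getD (cs.length - (g + 1) + t) ' ' = cs.getD (cs.length - (g + 1)) ' ' then 1 else 0)
          (fun t s => dfsA cs target (g - t) (count + (s : Int)) + getLRELen (s : Int)))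
        (0, pvINF)).2)
        (dfsA cs target g count) := by
  rw [dfsA.eq_def, if_neg h]
  rfl

lemma buildRows_succ (cs : List Char) (g : Nat) :
    buildRows cs (g + 1) =
      ((List.range (cs.length + 1)).map (fun need =>
        ((List.range' (cs.length - (g + 1)) (cs.length - (cs.length - (g + 1)))).foldl
          (stepOfB (fun j => if cs.getD j ' ' = cs.getD (cs.length - (g + 1)) ' ' then 1 else 0)
            (fun j sm => lreB sm + (((buildRows cs g).getD (j - (cs.length - (g + 1))) []).getD (need - sm) 0))
            need)
          (0, ((buildRows cs g).getD 0 []).getD need 0)).2))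
      :: buildRows cs g := rfl

-- dfsA never exceeds INF
lemma dfsA_le (cs : List Char) (target : Int) :
    ∀ (gas : Nat) (count : Int), dfsA cs target gas count ≤ pvINF := by
  intro gas
  induction gas with
  | zero =>
    intro count
    rw [dfsA]
    split
    · exact le_refl _
    · split
      · norm_num [pvINF]
      · exact le_refl _
  | succ g ih =>
    intro count
    rw [dfsA]
    split
    · exact le_refl _
    · exact le_trans (min_le_right _ _) (ih count)

-- A's inner loop stays at INF (and the counter stays bounded) when every candidate
-- reachable at its position is at least INF
lemma foldStep_ge (ind : Nat → Nat) (c : Nat → Nat → Int) (hind : ∀ t, ind t ≤ 1) :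
    ∀ (m : Nat),
      (∀ t s, t < m → s ≤ t + 1 → pvINF ≤ c t s) →
      pvINF ≤ ((List.range m).foldl (stepOf ind c) (0, pvINF)).2 ∧
      ((List.range m).foldl (stepOf ind c) (0, pvINF)).1 ≤ m := by
  intro m
  induction m with
  | zero => intro _; exact ⟨le_refl _, le_refl _⟩
  | succ m ih =>
    intro h
    obtain ⟨h1, h2⟩ := ih (fun t s ht hs => h t s (Nat.lt_succ_of_lt ht) hs)
    rw [List.range_succ, List.foldl_append, List.foldl_cons, List.foldl_nil]
    rcases hq : (List.range m).foldl (stepOf ind c) (0, pvINF) with ⟨sAcc, rAcc⟩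
    rw [hq] at h1 h2
    simp only [stepOf] at *
    have hi := hind m
    constructor
    · exact le_min h1 (h m (sAcc + ind m) (Nat.lt_succ_self m) (by omega))
    · simpa using by omega

-- dfsA is INF when fewer characters remain than must still be kept
lemma dfsA_inf (cs : List Char) (target : Int) :
    ∀ (gas : Nat) (count : Int), (gas : Int) < target - count → dfsA cs target gas count = pvINF := by
  intro gas
  induction gas using Nat.strong_induction_on with
  | _ gas ih =>
    intro count hlt
    have hng : ¬ count > target := by omega
    match gas with
    | 0 =>
      rw [dfsA_zero _ _ _ hng, if_neg (by omega)]
    | g + 1 =>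
      rw [dfsA_succ _ _ _ _ hng]
      obtain ⟨h1, _⟩ := foldStep_ge
        (fun t => if cs.getD (cs.length - (g + 1) + t) ' ' = cs.getD (cs.length - (g + 1)) ' ' then 1 else 0)
        (fun t s => dfsA cs target (g - t) (count + (s : Int)) + getLRELen (s : Int))
        (fun t => by beta_reduce; split <;> omega)
        (g + 1)
        (fun t s ht hs => by
          beta_reduce
          have hd : dfsA cs target (g - t) (count + (s : Int)) = pvINF := by
            apply ih (g - t) (by omega)
            have hc : ((g - t : Nat) : Int) = (g : Int) - (t : Int) := by omega
            rw [hc]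
            push_cast at hlt ⊢
            omega
          rw [hd]
          have := getLRELen_nonneg (s : Int) (by positivity)
          omega)
      rw [ih g (by omega) count (by push_cast at hlt ⊢; omega)]
      exact min_eq_right h1

-- pairing of A's inner loop (all candidates, starting at INF, delete branch min'ed
-- at the end) with B's inner loop (feasible candidates only, seeded with the delete
-- branch)
lemma foldPair (ind : Nat → Nat) (cA cB : Nat → Nat → Int) (need : Nat) (d : Int)
    (hd : d ≤ pvINF) :
    ∀ (l : List Nat),
      (∀ t ∈ l, ∀ s : Nat, s ≤ need → cA t s = cB t s) →
      (∀ t ∈ l, ∀ s : Nat, need < s → pvINF ≤ cA t s) →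
      ∀ (s0 : Nat) (rA : Int),
      (List.foldl (stepOfB ind cB need) (s0, min d rA) l).2
        = min d ((List.foldl (stepOf ind cA) (s0, rA) l).2) := by
  intro l
  induction l with
  | nil => intro _ _ s0 rA; rfl
  | cons t l ih =>
    intro heq hinf s0 rA
    simp only [List.foldl_cons, stepOf, stepOfB]
    by_cases hs : s0 + ind t ≤ need
    · rw [if_pos hs, ← heq t List.mem_cons_self _ hs, if_lt_min, min_assoc]
      exact ih (fun t' ht' => heq t' (List.mem_cons_of_mem _ ht'))
        (fun t' ht' => hinf t' (List.mem_cons_of_mem _ ht')) _ _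
    · rw [if_neg hs,
        min_absorb d rA (cA t (s0 + ind t))
          (le_trans hd (hinf t List.mem_cons_self _ (by omega)))]
      exact ih (fun t' ht' => heq t' (List.mem_cons_of_mem _ ht'))
        (fun t' ht' => hinf t' (List.mem_cons_of_mem _ ht')) _ _

-- main invariant: row d of B's table at stage g is A's dfs at gas g - d with
-- count = target - need
lemma rows_eq (cs : List Char) (target : Int) :
    ∀ (g : Nat), g ≤ cs.length → ∀ (d : Nat), d ≤ g → ∀ (need : Nat), need ≤ cs.length →
      ((buildRows cs g).getD d []).getD need 0 = dfsA cs target (g - d) (target - (need : Int)) := by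
  intro g
  induction g with
  | zero =>
    intro _ d hd need hneed
    interval_cases d
    rw [buildRows, List.getD_cons_zero]
    cases need with
    | zero =>
      rw [List.getD_cons_zero, dfsA_zero _ _ _ (by omega), if_pos (by omega)]
    | succ m =>
      rw [List.getD_cons_succ, dfsA_zero _ _ _ (by omega),
        if_neg (by omega)]
      simp [List.getD, Nat.lt_of_succ_le hneed]
  | succ g ih =>
    intro hg d hd need hneed
    cases d with
    | succ d' =>
      rw [buildRows_succ, List.getD_cons_succ, ih (by omega) d' (by omega) need hneed,
        show g + 1 - (d' + 1) = g - d' from by omega]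
    | zero =>
      rw [buildRows_succ, List.getD_cons_zero,
        PySem.List.getD_map_range _ (cs.length + 1) need 0 (by omega)]
      rw [show cs.length - (cs.length - (g + 1)) = g + 1 from by omega,
        List.range'_eq_map_range, List.foldl_map]
      have hd0 : ((buildRows cs g).getD 0 []).getD need 0
          = dfsA cs target g (target - (need : Int)) := by
        have := ih (by omega) 0 (by omega) need hneed
        simpa using this
      have hdle := dfsA_le cs target g (target - (need : Int))
      have hpair := foldPair
        (fun t => if cs.getD (cs.length - (g + 1) + t) ' ' = cs.getD (cs.length - (g + 1)) ' ' then 1 else 0)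
        (fun t s => dfsA cs target (g - t) ((target - (need : Int)) + (s : Int)) + getLRELen (s : Int))
        (fun t s => lreB s + (((buildRows cs g).getD ((cs.length - (g + 1) + t) - (cs.length - (g + 1))) []).getD (need - s) 0))
        need (dfsA cs target g (target - (need : Int))) hdle
        (List.range (g + 1))
        (fun t ht s hs => by
          have ht' : t < g + 1 := List.mem_range.mp ht
          simp only [Nat.add_sub_cancel_left]
          rw [ih (by omega) t (by omega) (need - s) (by omega), lreB_cast,
            show ((need - s : Nat) : Int) = (need : Int) - (s : Int) from by omega,
            show target - ((need : Int) - (s : Int)) = target - (need : Int) + (s : Int) from by ring]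
          exact add_comm _ _)
        (fun t ht s hs => by
          beta_reduce
          rw [dfsA_gt _ _ _ _ (by omega)]
          have := getLRELen_nonneg (s : Int) (by positivity)
          omega)
        0 pvINF
      rw [Nat.sub_zero, dfsA_succ _ _ _ _ (by omega), min_comm]
      calc ((List.range (g + 1)).foldl _ (0, ((buildRows cs g).getD 0 []).getD need 0)).2
          = ((List.range (g + 1)).foldl
              (stepOfB (fun t => if cs.getD (cs.length - (g + 1) + t) ' ' = cs.getD (cs.length - (g + 1)) ' ' then 1 else 0)
                (fun t s => lreB s + (((buildRows cs g).getD ((cs.length - (g + 1) + t) - (cs.length - (g + 1))) []).getD (need - s) 0))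
                need)
              (0, min (dfsA cs target g (target - (need : Int))) pvINF)).2 := by
            rw [min_eq_left hdle, ← hd0]
            rfl
        _ = min (dfsA cs target g (target - (need : Int)))
              (((List.range (g + 1)).foldl
                (stepOf (fun t => if cs.getD (cs.length - (g + 1) + t) ' ' = cs.getD (cs.length - (g + 1)) ' ' then 1 else 0)
                  (fun t s => dfsA cs target (g - t) ((target - (need : Int)) + (s : Int)) + getLRELen (s : Int)))
                (0, pvINF)).2) := hpair
        _ = _ := rfl

-- ===== VERDICT (by name: the statement is the Claim_ definition above) =====
theorem getLengthOfOptimalCompression_spec : Claim_equal_getLengthOfOptimalCompression := by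
  intro s k _
  unfold Spec_getLengthOfOptimalCompression
  show dfsA s.toList ((s.toList.length : Int) - k) s.toList.length 0
    = if ((s.toList.length : Int) - k) < 0 ∨ ((s.toList.length : Int)) < ((s.toList.length : Int) - k)
      then pvINF
      else ((buildRows s.toList s.toList.length).getD 0 []).getD ((s.toList.length : Int) - k).toNat 0
  by_cases h : ((s.toList.length : Int) - k) < 0 ∨ ((s.toList.length : Int)) < ((s.toList.length : Int) - k)
  · rw [if_pos h]
    rcases h with h | h
    · exact dfsA_gt _ _ _ _ (by omega)
    · exact dfsA_inf _ _ _ _ (by omega)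
  · rw [if_neg h]
    rw [rows_eq s.toList ((s.toList.length : Int) - k) s.toList.length (le_refl _) 0 (by omega)
          ((s.toList.length : Int) - k).toNat (by omega),
      Nat.sub_zero, Int.toNat_of_nonneg (by omega), sub_self]
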